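-- pv_equiv track=rewrite | github.com/ggr0405/music_evaluator | time.py | bcd_bits
-- ===== SOURCE A (Python) =====
-- def bcd_bits(value, bits_count=8):
--     # 输出BCD格式的 bits_count 位，默认8位（高4位 + 低4位）
--     tens = value // 10
--     ones = value % 10
--     bits = []
--     for i in range(3, -1, -1):
--         bits.append((tens >> i) & 1)
--     for i in range(3, -1, -1):
--         bits.append((ones >> i) & 1)
--     return bits[:bits_count]
-- ===== SOURCE B (Python) =====
-- def bcd_bits(value, bits_count=8):
--     # Pack both BCD nibbles into one byte, then peel 8 bits LSB-first and reverse.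
--     byte = value // 10 % 16 * 16 + value % 10
--     bits = []
--     for _ in range(8):
--         byte, b = divmod(byte, 2)
--         bits.append(b)
--     bits.reverse()
--     return bits[:bits_count]
-- ===== Notes on version B (the rewrite author's own statement) =====
-- stated objective: alternative
-- what changed: Instead of two MSB-first shift-and-mask loops over the separate digits, B packs both BCD nibbles into one byte (value//10%16*16 + value%10) and peels its 8 bits LSB-first with divmod(byte,2) into an accumulator that is reversed at the end, then slices.
import Mathlib
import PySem

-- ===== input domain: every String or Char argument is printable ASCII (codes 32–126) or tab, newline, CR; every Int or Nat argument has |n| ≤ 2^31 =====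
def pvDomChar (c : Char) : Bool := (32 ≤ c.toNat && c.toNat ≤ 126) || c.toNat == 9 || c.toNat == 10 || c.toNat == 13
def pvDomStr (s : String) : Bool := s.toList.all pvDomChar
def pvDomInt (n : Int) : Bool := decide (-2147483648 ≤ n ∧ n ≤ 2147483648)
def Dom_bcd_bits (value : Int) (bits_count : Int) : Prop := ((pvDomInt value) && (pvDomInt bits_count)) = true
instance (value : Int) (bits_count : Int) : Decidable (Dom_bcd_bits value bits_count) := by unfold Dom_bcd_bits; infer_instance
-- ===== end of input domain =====

-- B packs both BCD nibbles into one byte and peels its 8 bits LSB-first with divmod, reversing at the end (alternative decomposition, not faster).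


-- ===== PORT A =====
-- literal transliteration of A: tens = value // 10; ones = value % 10; two countdown loops
-- appending (x >> i) & 1 for i in range(3, -1, -1); then bits[:bits_count].
-- Python's '>> i' on int is Int.shiftRight (arithmetic shift; i is 3,2,1,0 here, always ≥ 0)
-- and '& 1' is PySem.Int.band; both are Python-exact per the PySem prelude.
def bcd_bits (value : Int) (bits_count : Int) : List Int :=
  let tens := PySem.Int.floordiv value 10
  let ones := PySem.Int.mod value 10
  let bits : List Int :=
    (PySem.List.pyRange 3 (-1) (-1)).foldl
      (fun acc i => acc ++ [PySem.Int.band (Int.shiftRight tens i.toNat) 1]) []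
  let bits :=
    (PySem.List.pyRange 3 (-1) (-1)).foldl
      (fun acc i => acc ++ [PySem.Int.band (Int.shiftRight ones i.toNat) 1]) bits
  PySem.List.slice bits none (some bits_count)

-- ===== PORT B =====
-- byte = value // 10 % 16 * 16 + value % 10; eight divmod(byte, 2) steps append the bits
-- LSB-first; the list is reversed and sliced.  divmod → PySem.Int.divmod? (divisor 2 ≠ 0).
def bcd_bits_alt (value : Int) (bits_count : Int) : List Int :=
  let byte := PySem.Int.mod (PySem.Int.floordiv value 10) 16 * 16 + PySem.Int.mod value 10
  let st :=
    (PySem.List.pyRange 0 8 1).foldl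
      (fun (st : Int × List Int) _ =>
        match PySem.Int.divmod? st.1 2 with
        | none => st
        | some (q, b) => (q, st.2 ++ [b])) (byte, [])
  PySem.List.slice st.2.reverse none (some bits_count)

-- ===== PRECONDITION & SPEC =====
def Spec_bcd_bits (value : Int) (bits_count : Int) (out : List Int) : Prop := out = bcd_bits_alt value bits_count
instance (value : Int) (bits_count : Int) (out : List Int) : Decidable (Spec_bcd_bits value bits_count out) := by unfold Spec_bcd_bits; infer_instance

-- ===== CLAIM (what is proved, stated in full; the proofs are below) =====
def Claim_equal_bcd_bits : Prop := ∀ (value : Int) (bits_count : Int), Dom_bcd_bits value bits_count → Spec_bcd_bits value bits_count (bcd_bits value bits_count)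

-- ===== LEMMAS AND PROOFS =====

-- the eight bit positions of t (mod 16) and o written via the packed byte t%16*16+o
theorem pv_lists (t o : Int) (ho0 : 0 ≤ o) (ho10 : o < 10) :
    [t / 8 % 2, t / 4 % 2, t / 2 % 2, t % 2, o / 8 % 2, o / 4 % 2, o / 2 % 2, o % 2] =
    [(t % 16 * 16 + o) / 128 % 2, (t % 16 * 16 + o) / 64 % 2, (t % 16 * 16 + o) / 32 % 2,
     (t % 16 * 16 + o) / 16 % 2, (t % 16 * 16 + o) / 8 % 2, (t % 16 * 16 + o) / 4 % 2,
     (t % 16 * 16 + o) / 2 % 2, (t % 16 * 16 + o) % 2] := by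
  simp only [List.cons.injEq, and_true]
  omega

-- B's eight divmod-by-2 steps on a byte in [0, 160) produce exactly its 8 bits, MSB first after the reverse
theorem pv_loop (n : Int) (h0 : 0 ≤ n) (h : n < 256) :
    (((PySem.List.pyRange 0 8 1).foldl
      (fun (st : Int × List Int) _ =>
        match PySem.Int.divmod? st.1 2 with
        | none => st
        | some (q, b) => (q, st.2 ++ [b])) (n, [])).2).reverse =
    [n / 128 % 2, n / 64 % 2, n / 32 % 2, n / 16 % 2, n / 8 % 2, n / 4 % 2, n / 2 % 2, n % 2] := by
  interval_cases n <;> decide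

theorem pv_main (value bits_count : Int) :
    bcd_bits value bits_count = bcd_bits_alt value bits_count := by
  unfold bcd_bits bcd_bits_alt
  set t := PySem.Int.floordiv value 10 with ht
  set o := PySem.Int.mod value 10 with ho
  have hoemod : o = value % 10 := by rw [ho, PySem.Int.mod_eq_emod_of_pos (by norm_num)]
  have ho0 : 0 ≤ o := by rw [hoemod]; exact Int.emod_nonneg value (by norm_num)
  have ho10 : o < 10 := by rw [hoemod]; exact Int.emod_lt_of_pos value (by norm_num)
  have hr : PySem.Int.mod t 16 = t % 16 := PySem.Int.mod_eq_emod_of_pos (by norm_num)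
  have hr0 : 0 ≤ t % 16 := Int.emod_nonneg t (by norm_num)
  have hr16 : t % 16 < 16 := Int.emod_lt_of_pos t (by norm_num)
  rw [show PySem.List.pyRange 3 (-1) (-1) = [3, 2, 1, 0] from by decide]
  simp only [List.foldl_cons, List.foldl_nil, List.nil_append, List.cons_append, hr]
  rw [pv_loop (t % 16 * 16 + o) (by omega) (by omega)]
  have hz : ∀ x : Int, Int.shiftRight x 0 = x := fun x => by cases x <;> rfl
  simp only [PySem.Int.band_one, PySem.Int.mod_eq_emod_of_pos (by norm_num : (0:Int) < 2),
    show ∀ (x : Int) (n : Nat), Int.shiftRight x n = x >>> n from fun _ _ => rfl,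
    Int.shiftRight_eq_div_pow,
    show ((3:Int).toNat) = 3 from rfl, show ((2:Int).toNat) = 2 from rfl,
    Int.toNat_one, Int.toNat_zero]
  norm_num
  rw [pv_lists t o ho0 ho10]

-- ===== VERDICT (by name: the statement is the Claim_ definition above) =====
theorem bcd_bits_spec : Claim_equal_bcd_bits := by
  intro value bits_count _
  unfold Spec_bcd_bits
  exact pv_main value bits_count
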